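-- pv_equiv track=rewrite | github.com/shikamaru-cc/my-pi-extensions | shark/image_to_pixel_data.py | render_ansi
-- ===== SOURCE A (Python) =====
-- from typing import Dict, List, Tuple
--
-- RGBA = Tuple[int, int, int, int]
--
-- def ansi_bg(color: RGBA) -> str:
--     r, g, b, _ = color
--     return f'\x1b[48;2;{r};{g};{b}m'
--
-- def render_ansi(art: List[str], palette: Dict[str, RGBA], cell_width: int = 2) -> str:
--     lines = []
--     blank = ' ' * cell_width
--     reset = '\x1b[0m'
--     for row in art:
--         parts = []
--         active = False
--         for sym in row:
--             if sym == '.':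
--                 if active:
--                     parts.append(reset)
--                     active = False
--                 parts.append(blank)
--             else:
--                 parts.append(ansi_bg(palette[sym]))
--                 parts.append(blank)
--                 active = True
--         if active:
--             parts.append(reset)
--         lines.append(''.join(parts))
--     return '\n'.join(lines)
-- ===== SOURCE B (Python) =====
-- from typing import Dict, List, Tuple
--
-- RGBA = Tuple[int, int, int, int]
--
-- def ansi_bg(color: RGBA) -> str:
--     r, g, b, _ = color
--     return f'\x1b[48;2;{r};{g};{b}m'
--
-- def render_ansi(art: List[str], palette: Dict[str, RGBA], cell_width: int = 2) -> str:
--     blank = ' ' * cell_width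
--     reset = '\x1b[0m'
--     lines = []
--     for row in art:
--         out = []
--         i = 0
--         n = len(row)
--         active = False
--         while i < n:
--             j = i + 1
--             if row[i] == '.':
--                 while j < n and row[j] == '.':
--                     j += 1
--                 if active:
--                     out.append(reset)
--                 out.append(blank * (j - i))
--                 active = False
--             else:
--                 while j < n and row[j] != '.':
--                     j += 1
--                 out.append(''.join(ansi_bg(palette[c]) + blank for c in row[i:j]))
--                 active = True
--             i = j
--         if active:
--             out.append(reset)
--         lines.append(''.join(out))
--     return '\n'.join(lines)
-- ===== Notes on version B (the rewrite author's own statement) =====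
-- stated objective: alternative
-- what changed: Replaced the per-character state machine (which checks and toggles an 'active' flag on every symbol) with a two-pointer run scanner: each maximal run of dots or of colored symbols is emitted in one step, with at most one reset per colored-to-dot transition.
import Mathlib
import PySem

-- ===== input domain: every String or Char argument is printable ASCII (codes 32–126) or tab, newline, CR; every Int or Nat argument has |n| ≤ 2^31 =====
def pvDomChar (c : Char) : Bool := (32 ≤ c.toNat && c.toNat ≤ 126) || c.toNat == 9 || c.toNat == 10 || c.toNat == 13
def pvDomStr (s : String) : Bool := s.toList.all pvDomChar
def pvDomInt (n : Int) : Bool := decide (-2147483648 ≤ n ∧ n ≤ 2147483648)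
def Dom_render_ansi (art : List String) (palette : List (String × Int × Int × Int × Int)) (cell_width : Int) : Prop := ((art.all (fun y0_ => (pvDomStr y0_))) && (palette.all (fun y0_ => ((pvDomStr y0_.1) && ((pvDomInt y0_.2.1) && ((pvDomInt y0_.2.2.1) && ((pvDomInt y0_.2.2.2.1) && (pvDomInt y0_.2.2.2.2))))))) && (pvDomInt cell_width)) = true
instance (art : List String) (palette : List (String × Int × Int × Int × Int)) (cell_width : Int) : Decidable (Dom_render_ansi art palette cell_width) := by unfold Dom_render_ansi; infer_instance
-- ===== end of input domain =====

-- B replaces A's per-character 'active' state machine by a two-pointer scan over maximal runs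
-- of dots / colored symbols (objective: alternative decomposition, same cost).

-- ===== PORT A =====
-- module helper ansi_bg (shared by both Pythons)
def ansiBg (color : Int × Int × Int × Int) : List Char :=
  ['\x1b', '[', '4', '8', ';', '2', ';'] ++ PySem.Int.toChars color.1 ++ [';'] ++
    PySem.Int.toChars color.2.1 ++ [';'] ++ PySem.Int.toChars color.2.2.1 ++ ['m']

def resetChars : List Char := ['\x1b', '[', '0', 'm']

-- palette[sym]; total form of the dict lookup, used only under Pre_ (KeyError excluded there)
def palGetD (palette : List (String × Int × Int × Int × Int)) (sym : Char) : Int × Int × Int × Int :=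
  ((palette.find? (fun p => p.1.toList == [sym])).map (·.2)).getD (0, 0, 0, 0)

-- one step of A's 'for sym in row' loop on the state (parts, active)
def stepA (palette : List (String × Int × Int × Int × Int)) (blank : List Char)
    (st : List (List Char) × Bool) (sym : Char) : List (List Char) × Bool :=
  if sym == '.' then
    let parts := if st.2 then st.1 ++ [resetChars] else st.1
    (parts ++ [blank], false)
  else
    (st.1 ++ [ansiBg (palGetD palette sym), blank], true)

-- A's inner loop over one row: fold the step, flush the trailing reset, ''.join
def rowA (palette : List (String × Int × Int × Int × Int)) (blank : List Char) (row : List Char) : List Char :=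
  let st := row.foldl (stepA palette blank) ([], false)
  let parts := if st.2 then st.1 ++ [resetChars] else st.1
  PySem.Chars.join [] parts

def render_ansi (art : List String) (palette : List (String × Int × Int × Int × Int)) (cell_width : Int) : String :=
  let blank := PySem.List.pyRepeat [' '] cell_width
  let lines := art.foldl (fun acc row => acc ++ [rowA palette blank row.toList]) []
  String.ofList (PySem.Chars.join ['\n'] lines)

-- ===== PORT B =====
-- the 'while i < n' run scanner of B: consume one maximal run per step, carrying 'active'
def rowB (palette : List (String × Int × Int × Int × Int)) (blank : List Char) :
    List Char → Bool → List Char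
  | [], active => if active then resetChars else []
  | c :: rest, active =>
    if c == '.' then
      let run := rest.takeWhile (fun d => d == '.')
      (if active then resetChars else []) ++
        PySem.List.pyRepeat blank ((1 + run.length : Nat) : Int) ++
        rowB palette blank (rest.dropWhile (fun d => d == '.')) false
    else
      let run := rest.takeWhile (fun d => d != '.')
      ((c :: run).flatMap (fun d => ansiBg (palGetD palette d) ++ blank)) ++
        rowB palette blank (rest.dropWhile (fun d => d != '.')) true
  termination_by l _ => l.length
  decreasing_by
    · exact Nat.lt_succ_of_le (List.length_dropWhile_le _ _)
    · exact Nat.lt_succ_of_le (List.length_dropWhile_le _ _)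

def render_ansi_alt (art : List String) (palette : List (String × Int × Int × Int × Int)) (cell_width : Int) : String :=
  let blank := PySem.List.pyRepeat [' '] cell_width
  String.ofList (PySem.Chars.join ['\n'] (art.map (fun row => rowB palette blank row.toList false)))

-- ===== PRECONDITION & SPEC =====
-- Pre_ excludes exactly the inputs where Python A raises KeyError: a non-'.' symbol absent from the palette.
def Pre_render_ansi (art : List String) (palette : List (String × Int × Int × Int × Int)) (cell_width : Int) : Prop :=
  (art.all (fun row => row.toList.all (fun c =>
    c == '.' || (palette.find? (fun p => p.1.toList == [c])).isSome))) = true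
instance (art : List String) (palette : List (String × Int × Int × Int × Int)) (cell_width : Int) : Decidable (Pre_render_ansi art palette cell_width) := by unfold Pre_render_ansi; infer_instance

def pvWitness_render_ansi : List String × (List (String × Int × Int × Int × Int)) × Int :=
  (["ab.", ".", ""], [("a", (1, 2, 3, 255)), ("b", (0, 10, 200, 0))], 2)

def Spec_render_ansi (art : List String) (palette : List (String × Int × Int × Int × Int)) (cell_width : Int) (out : String) : Prop := out = render_ansi_alt art palette cell_width
instance (art : List String) (palette : List (String × Int × Int × Int × Int)) (cell_width : Int) (out : String) : Decidable (Spec_render_ansi art palette cell_width out) := by unfold Spec_render_ansi; infer_instance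

-- ===== CLAIM (what is proved, stated in full; the proofs are below) =====
def Claim_equal_render_ansi : Prop := ∀ (art : List String) (palette : List (String × Int × Int × Int × Int)) (cell_width : Int), Dom_render_ansi art palette cell_width → Pre_render_ansi art palette cell_width → Spec_render_ansi art palette cell_width (render_ansi art palette cell_width)

-- ===== LEMMAS AND PROOFS =====

-- ''.join on char-lists is flatten
theorem join_nil_flatten (ls : List (List Char)) : PySem.Chars.join [] ls = ls.flatten := by
  induction ls with
  | nil => rfl
  | cons x t ih =>
    cases t with
    | nil => simp [PySem.Chars.join, List.intercalate]
    | cons y t' =>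
      simp only [PySem.Chars.join, List.intercalate, List.intersperse] at ih ⊢
      simp [ih]

theorem pyRepeat_succ (xs : List Char) (n : Nat) :
    PySem.List.pyRepeat xs ((n + 1 : Nat) : Int) = xs ++ PySem.List.pyRepeat xs (n : Int) := by
  simp [PySem.List.pyRepeat, List.replicate_succ]

-- the direct per-character recursion equivalent to A's fold
def loopA (palette : List (String × Int × Int × Int × Int)) (blank : List Char) :
    List Char → Bool → List Char
  | [], active => if active then resetChars else []
  | c :: cs, active =>
    if c == '.' then
      (if active then resetChars else []) ++ blank ++ loopA palette blank cs false
    else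
      ansiBg (palGetD palette c) ++ blank ++ loopA palette blank cs true

def flushA (st : List (List Char) × Bool) : List Char :=
  (if st.2 then st.1 ++ [resetChars] else st.1).flatten

theorem rowA_fold_eq (palette : List (String × Int × Int × Int × Int)) (blank : List Char)
    (row : List Char) : ∀ (parts : List (List Char)) (active : Bool),
    flushA (row.foldl (stepA palette blank) (parts, active))
      = parts.flatten ++ loopA palette blank row active := by
  induction row with
  | nil =>
    intro parts active
    cases active <;> simp [flushA, loopA]
  | cons c cs ih =>
    intro parts active
    rw [List.foldl_cons]
    by_cases hc : c = '.'
    · subst hc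
      cases active <;>
        simp [stepA, ih, loopA, List.append_assoc]
    · have hc' : (c == '.') = false := by simp [hc]
      cases active <;>
        simp [stepA, hc', ih, loopA, List.append_assoc]

theorem rowA_eq_loopA (palette : List (String × Int × Int × Int × Int)) (blank : List Char)
    (row : List Char) : rowA palette blank row = loopA palette blank row false := by
  have h := rowA_fold_eq palette blank row [] false
  simp only [flushA] at h
  simpa [rowA, join_nil_flatten] using h

-- rowB consumes a run at a time; the two step lemmas show it also steps one character at a time
theorem rowB_cons_dot (palette : List (String × Int × Int × Int × Int)) (blank : List Char)
    (cs : List Char) (active : Bool) :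
    rowB palette blank ('.' :: cs) active
      = (if active then resetChars else []) ++ blank ++ rowB palette blank cs false := by
  cases cs with
  | nil => simp [rowB, PySem.List.pyRepeat]
  | cons d ds =>
    by_cases hd : d = '.'
    · subst hd
      rw [rowB]
      simp only [beq_self_eq_true, if_true]
      conv_rhs => rw [rowB]
      simp only [beq_self_eq_true, if_true, List.takeWhile_cons, List.dropWhile_cons,
        List.length_cons]
      have h1 : (1 + ((List.takeWhile (fun d => d == '.') ds).length + 1) : Nat)
           = ((1 + (List.takeWhile (fun d => d == '.') ds).length) + 1 : Nat) := by omega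
      rw [h1, pyRepeat_succ]
      simp [List.append_assoc]
    · have hd' : (d == '.') = false := by simp [hd]
      rw [rowB]
      simp [hd', PySem.List.pyRepeat,
        List.append_assoc]

theorem rowB_cons_nondot (palette : List (String × Int × Int × Int × Int)) (blank : List Char)
    (c : Char) (hc : ¬ c = '.') (cs : List Char) (active : Bool) :
    rowB palette blank (c :: cs) active
      = ansiBg (palGetD palette c) ++ blank ++ rowB palette blank cs true := by
  have hc' : (c == '.') = false := by simp [hc]
  cases cs with
  | nil => simp [rowB, hc']
  | cons d ds =>
    by_cases hd : d = '.'
    · subst hd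
      rw [rowB]
      simp [hc', List.append_assoc]
    · have hd' : (d == '.') = false := by simp [hd]
      rw [rowB]
      conv_rhs => rw [rowB]
      simp [hc', hd', hd, List.append_assoc]

theorem loopA_eq_rowB (palette : List (String × Int × Int × Int × Int)) (blank : List Char)
    (row : List Char) : ∀ active, loopA palette blank row active = rowB palette blank row active := by
  induction row with
  | nil => intro active; cases active <;> simp [loopA, rowB]
  | cons c cs ih =>
    intro active
    by_cases hc : c = '.'
    · subst hc
      rw [rowB_cons_dot]
      simp [loopA, ih]
    · rw [rowB_cons_nondot palette blank c hc]
      have hc' : (c == '.') = false := by simp [hc]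
      simp [loopA, hc', ih]

theorem lines_foldl_eq_map (palette : List (String × Int × Int × Int × Int)) (blank : List Char)
    (art : List String) (acc : List (List Char)) :
    art.foldl (fun acc row => acc ++ [rowA palette blank row.toList]) acc
      = acc ++ art.map (fun row => rowB palette blank row.toList false) := by
  induction art generalizing acc with
  | nil => simp
  | cons r rs ih =>
    simp only [List.foldl_cons, List.map_cons, ih, List.append_assoc, List.cons_append,
      List.nil_append]
    rw [rowA_eq_loopA, loopA_eq_rowB]

-- ===== VERDICT (by name: the statement is the Claim_ definition above) =====
theorem render_ansi_spec : Claim_equal_render_ansi := by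
  intro art palette cell_width _ _
  unfold Spec_render_ansi
  simp only [render_ansi, render_ansi_alt, lines_foldl_eq_map, List.nil_append]
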